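-- pv_equiv track=rewrite | github.com/MaximeAboitIts/ALP-Python | ALP-S10/Ex2.py | analyse_des_notes
-- ===== SOURCE A (Python) =====
-- NOTE_OK = 0
--
-- AUCUNE_NOTE = 1
--
-- NOTE_INVALIDE = -2
--
-- NOTE_MIN = 1
--
-- NOTE_MAX = 6
--
-- LIMITE_SUFFISANT = 4
--
-- def analyse_des_notes(lst_notes):
--     ValNbValeur0 = 0
--     ValNbValeur1et6 = 0
--     ValNbInf4 = 0
--
--     for i in range(len(lst_notes)):
--         if lst_notes[i] == 0:
--             ValNbValeur0 = ValNbValeur0 + 1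
--         if lst_notes[i] >= NOTE_MIN and lst_notes[i] <= NOTE_MAX:
--             return NOTE_INVALIDE
--         if lst_notes[i] <= LIMITE_SUFFISANT:
--             ValNbInf4 = ValNbInf4 + 1
--
--     if ValNbValeur0 == len(lst_notes):
--         return AUCUNE_NOTE
--     elif ValNbValeur1et6 != len(lst_notes):
--         return NOTE_INVALIDE
--     elif ValNbInf4 == len(lst_notes):
--         return NOTE_OK
--
--     return 0
-- ===== SOURCE B (Python) =====
-- NOTE_OK = 0
--
-- AUCUNE_NOTE = 1
--
-- NOTE_INVALIDE = -2
--
-- NOTE_MIN = 1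
--
-- NOTE_MAX = 6
--
-- def analyse_des_notes(lst_notes):
--     if any(NOTE_MIN <= x <= NOTE_MAX for x in lst_notes):
--         return NOTE_INVALIDE
--     if all(x == 0 for x in lst_notes):
--         return AUCUNE_NOTE
--     return NOTE_INVALIDE
-- ===== Notes on version B (the rewrite author's own statement) =====
-- stated objective: simpler
-- what changed: Replaces the counter loop with dead v16 counter and post-loop case chain by two short-circuit predicate scans (any note in [1,6] -> NOTE_INVALIDE, all zero -> AUCUNE_NOTE, else NOTE_INVALIDE), dropping the three counters entirely.
import Mathlib
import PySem

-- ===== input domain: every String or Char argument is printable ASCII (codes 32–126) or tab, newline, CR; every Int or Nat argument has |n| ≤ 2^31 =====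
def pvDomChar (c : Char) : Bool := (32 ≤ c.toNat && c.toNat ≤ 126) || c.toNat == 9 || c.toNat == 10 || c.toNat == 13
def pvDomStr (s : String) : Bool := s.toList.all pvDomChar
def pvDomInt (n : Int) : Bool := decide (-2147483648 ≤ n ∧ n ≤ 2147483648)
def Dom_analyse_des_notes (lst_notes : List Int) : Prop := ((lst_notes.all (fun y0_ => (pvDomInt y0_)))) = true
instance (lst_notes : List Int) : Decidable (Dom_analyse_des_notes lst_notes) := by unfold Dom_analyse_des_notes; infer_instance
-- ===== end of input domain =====

-- B replaces A's counter loop (with a dead ValNbValeur1et6 counter) by two short-circuit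
-- predicate scans; objective: simpler, same O(n) cost.

-- ===== PORT A =====
-- loop over the list carrying the three counters; len is the original list length;
-- early 'return NOTE_INVALIDE' short-circuits; the [] case is A's post-loop chain.
def pvLoopA (len : Int) : List Int → Int → Int → Int → Int
  | [], v0, v16, inf4 =>
      if v0 = len then 1
      else if v16 ≠ len then -2
      else if inf4 = len then 0
      else 0
  | x :: rest, v0, v16, inf4 =>
      let v0' := if x = 0 then v0 + 1 else v0
      if 1 ≤ x ∧ x ≤ 6 then -2
      else
        let inf4' := if x ≤ 4 then inf4 + 1 else inf4
        pvLoopA len rest v0' v16 inf4'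

def analyse_des_notes (lst_notes : List Int) : Int :=
  pvLoopA (lst_notes.length : Int) lst_notes 0 0 0

-- ===== PORT B =====
def analyse_des_notes_alt (lst_notes : List Int) : Int :=
  if lst_notes.any (fun x => decide (1 ≤ x) && decide (x ≤ 6)) then -2
  else if lst_notes.all (fun x => x == 0) then 1
  else -2

-- ===== PRECONDITION & SPEC =====
def Spec_analyse_des_notes (lst_notes : List Int) (out : Int) : Prop := out = analyse_des_notes_alt lst_notes
instance (lst_notes : List Int) (out : Int) : Decidable (Spec_analyse_des_notes lst_notes out) := by unfold Spec_analyse_des_notes; infer_instance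

-- ===== CLAIM (what is proved, stated in full; the proofs are below) =====
def Claim_equal_analyse_des_notes : Prop := ∀ (lst_notes : List Int), Dom_analyse_des_notes lst_notes → Spec_analyse_des_notes lst_notes (analyse_des_notes lst_notes)

-- ===== LEMMAS AND PROOFS =====

-- Characterisation of A's loop when the v16 counter starts (hence stays) at 0.
lemma pvLoopA_spec (l : List Int) : ∀ (len v0 inf4 : Int),
    pvLoopA len l v0 0 inf4 =
      if l.any (fun x => decide (1 ≤ x) && decide (x ≤ 6)) then -2
      else if v0 + (l.countP (fun x => x == 0) : Int) = len then 1
      else if len ≠ 0 then -2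
      else 0 := by
  induction l with
  | nil =>
      intro len v0 inf4
      simp only [pvLoopA, List.any_nil, Bool.false_eq_true, if_false, List.countP_nil,
        Nat.cast_zero, add_zero]
      by_cases h : v0 = len
      · simp [h]
      · rw [if_neg h, if_neg h]
        by_cases h0 : len = 0
        · simp [h0]
        · rw [if_pos (fun hh => h0 hh.symm), if_pos h0]
  | cons x rest ih =>
      intro len v0 inf4
      by_cases hx : 1 ≤ x ∧ x ≤ 6
      · simp [pvLoopA, hx]
      · have hx' : ¬ (decide (1 ≤ x) && decide (x ≤ 6)) = true := by
          simpa [decide_eq_true_eq] using hx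
        by_cases h0 : x = 0
        · simp only [pvLoopA, h0]
          simp [ih]
          have : v0 + 1 + (rest.countP (fun x => x == 0) : Int)
               = v0 + ((rest.countP (fun x => x == 0) : Int) + 1) := by ring
          rw [this]
        · simp [pvLoopA, hx, hx', h0, ih]

-- all (== 0) holds iff the zero count equals the length
lemma all_zero_iff_count (l : List Int) :
    (l.all (fun x => x == 0)) = true ↔ l.countP (fun x => x == 0) = l.length := by
  constructor
  · intro h
    apply List.countP_eq_length.mpr
    intro a ha
    exact List.all_eq_true.mp h a ha
  · intro h
    exact List.all_eq_true.mpr (List.countP_eq_length.mp h)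

-- ===== VERDICT (by name: the statement is the Claim_ definition above) =====
theorem analyse_des_notes_spec : Claim_equal_analyse_des_notes := by
  intro l _
  show analyse_des_notes l = analyse_des_notes_alt l
  unfold analyse_des_notes analyse_des_notes_alt
  rw [pvLoopA_spec]
  by_cases hany : (l.any (fun x => decide (1 ≤ x) && decide (x ≤ 6))) = true
  · rw [if_pos hany, if_pos hany]
  · have hany' : (l.any (fun x => decide (1 ≤ x) && decide (x ≤ 6))) = false := by
      simpa using hany
    rw [hany']
    simp only [Bool.false_eq_true, if_false]
    by_cases hall : (l.all (fun x => x == 0)) = true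
    · have hc := (all_zero_iff_count l).mp hall
      rw [if_pos (by rw [hc]; ring), if_pos hall]
    · have hall' : (l.all (fun x => x == 0)) = false := by simpa using hall
      have hc : l.countP (fun x => x == 0) ≠ l.length :=
        fun h => hall ((all_zero_iff_count l).mpr h)
      have hcI : ¬ ((0 : Int) + (l.countP (fun x => x == 0) : Int) = (l.length : Int)) := by
        intro h
        exact hc (by exact_mod_cast (by simpa using h))
      have hlenI : (l.length : Int) ≠ 0 := by
        intro h
        apply hc
        have h0 : l.length = 0 := by exact_mod_cast h
        have := List.countP_le_length (p := fun x => x == 0) (l := l)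
        omega
      rw [if_neg hcI, if_pos hlenI, hall']
      simp
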